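-- pv_equiv track=rewrite | github.com/pypi-data/pypi-mirror-325 | packages/tgui/tgui-1.0.20.tar.gz/tgui-1.0.20/tgui/src/utils/utils.py | list2layout
-- ===== SOURCE A (Python) =====
-- from typing import List, Any
--
-- def button_row_layout(count: int) -> List[int]:
--   """
--   Расставляет кнопки по рядам, чтобы было красиво
--
--   :param count: количество кнопок
--   :return: список чисел, каждое из которых представляет сколько кнопок должно
--            быть в данном ряду
--   """
--   return ([] if count < 1 else
--           [count] if count <= 3 else [2, 2] if count == 4 else [3] +
--           button_row_layout(count - 3))
--
-- def list2layout(elems: List[Any]) -> List[List[Any]]: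
--   """
--   Распределяет элементы по рядам, чтобы было красиво:
--   8 элементов:   7 элементов:
--   * * *          * * *
--   * * *           * *
--    * *            * *
--
--   :param elems: элементы, которые нужно распределить
--   :return: элементы, красиво распределённые по рядам
--   """
--   layout = button_row_layout(len(elems))
--   pos = 0
--   result = []
--   for row_width in layout:
--     result.append([elems[i] for i in range(pos, pos + row_width)])
--     pos += row_width
--   return result
-- ===== SOURCE B (Python) =====
-- def list2layout(elems):
--   n = len(elems)
--   if n < 1:
--     return []
--   if n == 4:
--     sizes = [2, 2]
--   elif n <= 3:
--     sizes = [n]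
--   else:
--     k = (n - 2) // 3          # number of leading rows of 3
--     r = n - 3 * k             # remaining elements, in {2, 3, 4}
--     sizes = [3] * k + ([2, 2] if r == 4 else [r])
--   rows = []
--   rest = elems
--   for w in sizes:
--     rows.append(rest[:w])
--     rest = rest[w:]
--   return rows
-- ===== Notes on version B (the rewrite author's own statement) =====
-- stated objective: simpler
-- what changed: Replaces the recursive row-sizing with a closed-form count of 3-rows (k=(n-2)//3) plus an arithmetic tail, and builds rows by slicing off the front of the remaining list instead of index-based range comprehensions.
import Mathlib
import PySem

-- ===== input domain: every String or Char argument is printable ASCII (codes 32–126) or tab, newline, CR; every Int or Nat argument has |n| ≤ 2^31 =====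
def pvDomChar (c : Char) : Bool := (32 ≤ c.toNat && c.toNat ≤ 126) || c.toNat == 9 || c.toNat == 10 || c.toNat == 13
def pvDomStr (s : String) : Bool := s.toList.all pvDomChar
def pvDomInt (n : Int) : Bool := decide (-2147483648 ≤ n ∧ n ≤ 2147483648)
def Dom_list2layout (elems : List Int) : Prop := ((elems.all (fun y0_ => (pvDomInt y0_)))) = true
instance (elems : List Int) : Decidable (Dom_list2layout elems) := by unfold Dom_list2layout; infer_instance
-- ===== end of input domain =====

-- B replaces the recursive row-sizing by a closed form and builds rows by slicing off
-- the front of the remaining list (objective: simpler).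

-- ===== PORT A =====
-- recursion on count, exactly as button_row_layout
def buttonRowLayout (count : Int) : List Int :=
  if count < 1 then []
  else if count ≤ 3 then [count]
  else if count = 4 then [2, 2]
  else 3 :: buttonRowLayout (count - 3)
termination_by count.toNat
decreasing_by omega

-- the comprehension [elems[i] for i in range(pos, pos+w)] is ported with pyGetD;
-- layout sums to len(elems), so every index is in range and the default is never used
def list2layout (elems : List Int) : List (List Int) :=
  let layout := buttonRowLayout (elems.length : Int)
  (layout.foldl
    (fun (st : Int × List (List Int)) w =>
      (st.1 + w,
       st.2 ++ [(PySem.List.pyRange st.1 (st.1 + w) 1).map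
                  (fun i => PySem.List.pyGetD elems i 0)]))
    (0, [])).2

-- ===== PORT B =====
-- [3] * k ported as List.replicate k.toNat 3 (exact: Python gives [] for k ≤ 0 too)
def rowSizes (n : Int) : List Int :=
  if n < 1 then []
  else if n = 4 then [2, 2]
  else if n ≤ 3 then [n]
  else
    let k := PySem.Int.floordiv (n - 2) 3
    let r := n - 3 * k
    List.replicate k.toNat 3 ++ (if r = 4 then [2, 2] else [r])

-- rest[:w] / rest[w:] ported as take/drop (exact here: every row width w is ≥ 0)
def list2layout_alt (elems : List Int) : List (List Int) :=
  let sizes := rowSizes (elems.length : Int)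
  (sizes.foldl
    (fun (st : List (List Int) × List Int) w =>
      (st.1 ++ [st.2.take w.toNat], st.2.drop w.toNat))
    ([], elems)).1

-- ===== PRECONDITION & SPEC =====
def Spec_list2layout (elems : List Int) (out : List (List Int)) : Prop := out = list2layout_alt elems
instance (elems : List Int) (out : List (List Int)) : Decidable (Spec_list2layout elems out) := by unfold Spec_list2layout; infer_instance

-- ===== CLAIM (what is proved, stated in full; the proofs are below) =====
def Claim_equal_list2layout : Prop := ∀ (elems : List Int), Dom_list2layout elems → Spec_list2layout elems (list2layout elems)

-- ===== LEMMAS AND PROOFS =====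

-- for n >= 5 the closed form satisfies the same step as the recursion
theorem rowSizes_step (n : Int) (h5 : 5 <= n) : rowSizes n = 3 :: rowSizes (n - 3) := by
  by_cases h8 : 8 <= n
  · simp only [rowSizes]
    rw [if_neg (show ¬ n < 1 by omega), if_neg (show ¬ n = 4 by omega),
        if_neg (show ¬ n <= 3 by omega), if_neg (show ¬ n - 3 < 1 by omega),
        if_neg (show ¬ n - 3 = 4 by omega), if_neg (show ¬ n - 3 <= 3 by omega)]
    rw [PySem.Int.floordiv_eq_ediv_of_pos (show (0:Int) < 3 by norm_num),
        PySem.Int.floordiv_eq_ediv_of_pos (show (0:Int) < 3 by norm_num)]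
    have hk : (n - 2) / 3 = (n - 3 - 2) / 3 + 1 := by omega
    have hk0 : 0 <= (n - 3 - 2) / 3 := by omega
    rw [hk]
    have ht : ((n - 3 - 2) / 3 + 1).toNat = ((n - 3 - 2) / 3).toNat + 1 := by omega
    rw [ht, List.replicate_succ]
    have hr : n - 3 * ((n - 3 - 2) / 3 + 1) = n - 3 - 3 * ((n - 3 - 2) / 3) := by ring
    rw [hr]
    simp
  · have h567 : n = 5 ∨ n = 6 ∨ n = 7 := by omega
    rcases h567 with h | h | h <;> subst h <;> decide

-- the two row-size computations agree
theorem rowSizes_eq (n : Int) : buttonRowLayout n = rowSizes n := by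
  fun_induction buttonRowLayout n with
  | case1 n h1 => rw [rowSizes, if_pos h1]
  | case2 n h1 h2 =>
    rw [rowSizes, if_neg h1, if_neg (by omega), if_pos h2]
  | case3 h1 h2 => decide
  | case4 n h1 h2 h3 ih =>
    rw [ih, rowSizes_step n (by omega)]

theorem brl_sum (n : Int) (h : 0 <= n) : (buttonRowLayout n).sum = n := by
  fun_induction buttonRowLayout n with
  | case1 n h1 => simp; omega
  | case2 n h1 h2 => simp
  | case3 h1 h2 => decide
  | case4 n h1 h2 h3 ih =>
    rw [List.sum_cons, ih (by omega)]
    ring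

theorem brl_nonneg (n : Int) (w : Int) (hw : w ∈ buttonRowLayout n) : 0 <= w := by
  fun_induction buttonRowLayout n with
  | case1 n h1 => simp at hw
  | case2 n h1 h2 => simp at hw; omega
  | case3 h1 h2 => simp at hw; omega
  | case4 n h1 h2 h3 ih =>
    rcases List.mem_cons.mp hw with h | h
    · omega
    · exact ih h

-- the range comprehension of A equals B's take of a drop
theorem seg_eq (elems : List Int) (p w : Nat) (hpw : p + w <= elems.length) :
    (PySem.List.pyRange (p : Int) ((p : Int) + (w : Int)) 1).map
      (fun i => PySem.List.pyGetD elems i 0)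
      = (elems.drop p).take w := by
  induction w generalizing p with
  | zero => simp
  | succ w ih =>
    have hp : p < elems.length := by omega
    rw [PySem.List.pyRange_one_cons (by push_cast; omega)]
    rw [List.drop_eq_getElem_cons hp]
    simp only [List.map_cons, List.take_succ_cons]
    congr 1
    · simp [hp]
    · have h1 : ((p : Int) + 1) = ((p + 1 : Nat) : Int) := by push_cast; ring
      have h2 : ((p : Int) + ((w + 1 : Nat) : Int)) = ((p + 1 : Nat) : Int) + (w : Int) := by
        push_cast; ring
      rw [h2, h1, ih (p + 1) (by omega)]

-- the two row-building folds agree, given nonnegative sizes fitting in elems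
theorem fold_eq (elems : List Int) (sizes : List Int) (p : Nat) (acc : List (List Int))
    (hs : ∀ w ∈ sizes, 0 <= w) (hsum : (p : Int) + sizes.sum <= elems.length) :
    (sizes.foldl
      (fun (st : Int × List (List Int)) w =>
        (st.1 + w,
         st.2 ++ [(PySem.List.pyRange st.1 (st.1 + w) 1).map
                    (fun i => PySem.List.pyGetD elems i 0)]))
      ((p : Int), acc)).2
    = (sizes.foldl
        (fun (st : List (List Int) × List Int) w =>
          (st.1 ++ [st.2.take w.toNat], st.2.drop w.toNat))
        (acc, elems.drop p)).1 := by
  induction sizes generalizing p acc with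
  | nil => simp
  | cons w rest ih =>
    have hw : 0 <= w := hs w (by simp)
    have hrest : 0 <= rest.sum :=
      List.sum_nonneg (fun x hx => hs x (List.mem_cons_of_mem w hx))
    have hsum' : (p : Int) + w + rest.sum <= elems.length := by
      rw [List.sum_cons] at hsum
      omega
    have hfit : p + w.toNat <= elems.length := by omega
    simp only [List.foldl_cons]
    have hseg : (PySem.List.pyRange (p : Int) ((p : Int) + w) 1).map
        (fun i => PySem.List.pyGetD elems i 0) = (elems.drop p).take w.toNat := by
      have hwc : w = ((w.toNat : Nat) : Int) := by omega
      rw [hwc]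
      exact seg_eq elems p w.toNat hfit
    have hcast : (p : Int) + w = ((p + w.toNat : Nat) : Int) := by push_cast; omega
    rw [hseg, hcast,
        ih (p + w.toNat) _ (fun x hx => hs x (List.mem_cons_of_mem w hx))
          (by push_cast; omega),
        List.drop_drop]

-- ===== VERDICT (by name: the statement is the Claim_ definition above) =====
theorem list2layout_spec : Claim_equal_list2layout := by
  intro elems _
  show list2layout elems = list2layout_alt elems
  unfold list2layout list2layout_alt
  rw [<- rowSizes_eq]
  have hb := fold_eq elems (buttonRowLayout (elems.length : Int)) 0 []
    (fun w hw => brl_nonneg _ w hw)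
    (by rw [brl_sum _ (by positivity)]; push_cast; omega)
  simpa using hb
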